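-- pv_equiv track=rewrite | github.com/aljazvaupotic/AOC | 2024/aoc24_02.py | check_with_one_removal
-- ===== SOURCE A (Python) =====
-- def check_with_one_removal(lst):
--     """
--     Checks if removing one element from the report can make it safe.
--     Returns True if removing one element makes the report safe, False otherwise.
--     """
--     # If the report is already safe without removal
--     if is_sorted_and_differences_valid(lst):
--         return True
--
--     # Try removing each element one by one and check if the new list is safe
--     for i in range(len(lst)):
--         # Create a new list without the element at index i
--         new_lst = lst[:i] + lst[i + 1:]
--         if is_sorted_and_differences_valid(new_lst):
--             return True
--
--     # If no valid list was found, return False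
--     return False
--
-- def is_sorted_and_differences_valid(lst):
--     is_ascending = True
--     is_descending = True
--     for i in range(1, len(lst)):
--         diff = abs(lst[i] - lst[i - 1])
--         if not 1 <= diff <= 3:
--             return False  # Difference is not valid
--         if lst[i] < lst[i - 1]:
--             is_ascending = False
--         if lst[i] > lst[i - 1]:
--             is_descending = False
--
--     return is_ascending or is_descending  # Check if list is either ascending or descending
-- ===== SOURCE B (Python) =====
-- def check_with_one_removal(lst):
--     """O(n): per direction, scan to the first violating adjacent pair and test
--     only the two removal candidates (that pair's endpoints)."""
--     def ok(a, b, s):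
--         d = (b - a) * s
--         return 1 <= d <= 3
--
--     def safe(xs, s):
--         for i, (a, b) in enumerate(zip(xs, xs[1:])):
--             if not ok(a, b, s):
--                 return False
--         return True
--
--     def find_violation(s):
--         for i, (a, b) in enumerate(zip(lst, lst[1:])):
--             if not ok(a, b, s):
--                 return i
--         return None
--
--     def check_dir(s):
--         j = find_violation(s)
--         if j is None:
--             return True
--         return safe(lst[:j] + lst[j + 1:], s) or safe(lst[:j + 1] + lst[j + 2:], s)
--
--     return check_dir(1) or check_dir(-1)
-- ===== Notes on version B (the rewrite author's own statement) =====
-- stated objective: faster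
-- what changed: Instead of retrying the full safety check after removing every index (O(n^2)), B scans once per direction (ascending/descending) to the first violating adjacent pair and tests only that pair's two endpoints as removal candidates (O(n)).
import Mathlib
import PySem

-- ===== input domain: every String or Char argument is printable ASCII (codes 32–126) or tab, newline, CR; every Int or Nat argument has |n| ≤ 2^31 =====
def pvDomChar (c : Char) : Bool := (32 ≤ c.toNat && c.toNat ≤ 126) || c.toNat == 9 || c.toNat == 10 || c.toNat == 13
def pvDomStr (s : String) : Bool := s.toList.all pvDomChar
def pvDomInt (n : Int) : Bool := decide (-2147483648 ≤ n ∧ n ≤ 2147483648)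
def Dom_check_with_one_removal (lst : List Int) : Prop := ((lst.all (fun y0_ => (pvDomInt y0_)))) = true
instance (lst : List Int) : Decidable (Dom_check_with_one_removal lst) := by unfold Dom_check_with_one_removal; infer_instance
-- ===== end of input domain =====

-- B changes the O(n^2) try-every-removal search into an O(n) scan that, per direction,
-- finds the first violating adjacent pair and tests only its two endpoints as removal candidates.

-- ===== PORT A =====
-- loop `for i in range(1, len(lst))` of is_sorted_and_differences_valid, carrying the two flags
def pvValidLoop (prev : Int) (xs : List Int) (asc desc : Bool) : Bool :=
  match xs with
  | [] => asc || desc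
  | x :: t =>
    let diff := (x - prev).natAbs          -- abs(lst[i] - lst[i-1])
    if ¬ (1 ≤ diff ∧ diff ≤ 3) then false
    else pvValidLoop x t (if x < prev then false else asc) (if prev < x then false else desc)

def is_sorted_and_differences_valid (lst : List Int) : Bool :=
  match lst with
  | [] => true
  | h :: t => pvValidLoop h t true true

def check_with_one_removal (lst : List Int) : Bool :=
  if is_sorted_and_differences_valid lst then true
  else
    -- for i in range(len(lst)): lst[:i] + lst[i+1:]  (slices exact for 0 ≤ i)
    (List.range lst.length).any (fun i =>
      is_sorted_and_differences_valid (lst.take i ++ lst.drop (i + 1)))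

-- ===== PORT B =====
-- ok(a, b, s): 1 <= (b - a) * s <= 3
def pvOk (s a b : Int) : Bool := decide (1 ≤ (b - a) * s ∧ (b - a) * s ≤ 3)

-- safe(xs, s): loop over adjacent pairs zip(xs, xs[1:])
def pvSafe (s : Int) : List Int → Bool
  | a :: b :: t => pvOk s a b && pvSafe s (b :: t)
  | _ => true

-- find_violation(s): index of the first violating adjacent pair, None if none
def pvFindViol (s : Int) : List Int → Option Nat
  | a :: b :: t => if pvOk s a b then (pvFindViol s (b :: t)).map (· + 1) else some 0
  | _ => none

-- lst[:i] + lst[i+1:]  (slices exact for 0 ≤ i)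
def pvRemoveAt (xs : List Int) (i : Nat) : List Int := xs.take i ++ xs.drop (i + 1)

def pvCheckDir (s : Int) (lst : List Int) : Bool :=
  match pvFindViol s lst with
  | none => true
  | some j => pvSafe s (pvRemoveAt lst j) || pvSafe s (pvRemoveAt lst (j + 1))

def check_with_one_removal_alt (lst : List Int) : Bool :=
  pvCheckDir 1 lst || pvCheckDir (-1) lst

-- ===== PRECONDITION & SPEC =====
def Spec_check_with_one_removal (lst : List Int) (out : Bool) : Prop := out = check_with_one_removal_alt lst
instance (lst : List Int) (out : Bool) : Decidable (Spec_check_with_one_removal lst out) := by unfold Spec_check_with_one_removal; infer_instance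

-- ===== CLAIM (what is proved, stated in full; the proofs are below) =====
def Claim_equal_check_with_one_removal : Prop := ∀ (lst : List Int), Dom_check_with_one_removal lst → Spec_check_with_one_removal lst (check_with_one_removal lst)

-- ===== LEMMAS AND PROOFS =====

-- pvSafe as a universally quantified statement over adjacent pairs (via getElem?)
theorem pvSafe_iff (s : Int) : ∀ (xs : List Int),
    pvSafe s xs = true ↔ ∀ (i : Nat) (a b : Int), xs[i]? = some a → xs[i+1]? = some b → pvOk s a b = true
  | [] => by
      simp [pvSafe]
  | [a] => by
      constructor
      · intro _ i x y hx hy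
        rcases i with _ | i <;> simp at hy
      · intro _; rfl
  | a :: b :: t => by
    rw [show pvSafe s (a :: b :: t) = (pvOk s a b && pvSafe s (b :: t)) from rfl,
        Bool.and_eq_true, pvSafe_iff s (b :: t)]
    constructor
    · rintro ⟨h0, h⟩ i x y hx hy
      cases i with
      | zero =>
        simp at hx hy; subst hx; subst hy; exact h0
      | succ k =>
        exact h k x y (by simpa using hx) (by simpa using hy)
    · intro h
      refine ⟨h 0 a b rfl rfl, fun k x y hx hy => h (k+1) x y (by simpa using hx) (by simpa using hy)⟩

theorem pvFindViol_none (s : Int) : ∀ (xs : List Int),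
    pvFindViol s xs = none ↔ pvSafe s xs = true
  | [] => by simp [pvFindViol, pvSafe]
  | [a] => by simp [pvFindViol, pvSafe]
  | a :: b :: t => by
    rw [show pvFindViol s (a :: b :: t)
          = (if pvOk s a b then (pvFindViol s (b :: t)).map (· + 1) else some 0) from rfl,
        show pvSafe s (a :: b :: t) = (pvOk s a b && pvSafe s (b :: t)) from rfl]
    by_cases h : pvOk s a b = true
    · simp [h, Option.map_eq_none_iff, pvFindViol_none s (b :: t)]
    · simp [h]

theorem pvFindViol_some (s : Int) : ∀ (xs : List Int) (j : Nat),
    pvFindViol s xs = some j →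
      ∃ a b : Int, xs[j]? = some a ∧ xs[j+1]? = some b ∧ pvOk s a b = false
  | [] => by intro j h; simp [pvFindViol] at h
  | [a] => by intro j h; simp [pvFindViol] at h
  | a :: b :: t => by
    intro j h
    rw [show pvFindViol s (a :: b :: t)
          = (if pvOk s a b then (pvFindViol s (b :: t)).map (· + 1) else some 0) from rfl] at h
    by_cases hok : pvOk s a b = true
    · rw [if_pos hok, Option.map_eq_some_iff] at h
      obtain ⟨k, hk, rfl⟩ := h
      obtain ⟨x, y, hx, hy, hxy⟩ := pvFindViol_some s (b :: t) k hk
      exact ⟨x, y, by simpa using hx, by simpa using hy, hxy⟩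
    · rw [if_neg hok] at h
      cases h
      exact ⟨a, b, rfl, rfl, by simpa using hok⟩

theorem pvRemoveAt_getElem?_lt (xs : List Int) (i k : Nat) (h : k < i) :
    (pvRemoveAt xs i)[k]? = xs[k]? := by
  unfold pvRemoveAt
  rw [List.getElem?_append]
  split
  · rw [List.getElem?_take]
    simp [h]
  · rename_i hlen
    rw [List.length_take] at hlen
    rw [List.getElem?_drop]
    have h1 : ¬ k < min i xs.length := hlen
    have h2 : xs.length ≤ k := by omega
    rw [List.getElem?_eq_none (by simpa [List.length_take] using Nat.le_refl _ |>.trans (by omega)),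
        List.getElem?_eq_none (by omega)]

theorem pvRemoveAt_getElem?_ge (xs : List Int) (i k : Nat) (hik : i ≤ k) (hi : i ≤ xs.length) :
    (pvRemoveAt xs i)[k]? = xs[k+1]? := by
  unfold pvRemoveAt
  rw [List.getElem?_append_right (by rw [List.length_take]; omega)]
  rw [List.getElem?_drop, List.length_take]
  congr 1
  omega

-- if some removal keeps direction s safe, it removes one endpoint of the first violating pair
theorem pvCandidates (s : Int) (xs : List Int) (i j : Nat) (hi : i < xs.length)
    (hsafe : pvSafe s (pvRemoveAt xs i) = true) (hj : pvFindViol s xs = some j) :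
    i = j ∨ i = j + 1 := by
  obtain ⟨a, b, ha, hb, hab⟩ := pvFindViol_some s xs j hj
  by_contra hcon
  push Not at hcon
  have hP := (pvSafe_iff s (pvRemoveAt xs i)).mp hsafe
  rcases Nat.lt_or_ge i j with hij | hij
  · -- i < j: pair (a,b) sits at positions (j-1, j) of the removal
    have hj1 : 1 ≤ j := by omega
    have e1 : (pvRemoveAt xs i)[j-1]? = xs[j]? := by
      rw [pvRemoveAt_getElem?_ge xs i (j-1) (by omega) (by omega)]
      congr 1; omega
    have e2 : (pvRemoveAt xs i)[(j-1)+1]? = xs[j+1]? := by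
      rw [show (j-1)+1 = j by omega, pvRemoveAt_getElem?_ge xs i j (by omega) (by omega)]
    have := hP (j-1) a b (by rw [e1]; exact ha) (by rw [e2]; exact hb)
    rw [hab] at this; exact Bool.false_ne_true this
  · -- i ≥ j, i ≠ j, i ≠ j+1 ⇒ j+1 < i: pair untouched at (j, j+1)
    have hgt : j + 1 < i := by omega
    have e1 : (pvRemoveAt xs i)[j]? = xs[j]? := pvRemoveAt_getElem?_lt xs i j (by omega)
    have e2 : (pvRemoveAt xs i)[j+1]? = xs[j+1]? := pvRemoveAt_getElem?_lt xs i (j+1) (by omega)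
    have := hP j a b (by rw [e1]; exact ha) (by rw [e2]; exact hb)
    rw [hab] at this; exact Bool.false_ne_true this

theorem pvCheckDir_iff (s : Int) (xs : List Int) :
    pvCheckDir s xs = true ↔
      (pvSafe s xs = true ∨ ∃ i, i < xs.length ∧ pvSafe s (pvRemoveAt xs i) = true) := by
  unfold pvCheckDir
  cases h : pvFindViol s xs with
  | none =>
    simp only [true_iff]
    exact Or.inl ((pvFindViol_none s xs).mp h)
  | some j =>
    obtain ⟨a, b, ha, hb, hab⟩ := pvFindViol_some s xs j h
    have hjlen : j + 1 < xs.length := by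
      have := List.getElem?_eq_some_iff.mp hb
      exact this.1
    rw [Bool.or_eq_true]
    constructor
    · rintro (hc | hc)
      · exact Or.inr ⟨j, by omega, hc⟩
      · exact Or.inr ⟨j+1, by omega, hc⟩
    · rintro (hsafe | ⟨i, hilen, hsafe⟩)
      · exfalso
        have := (pvSafe_iff s xs).mp hsafe j a b ha hb
        rw [hab] at this; exact Bool.false_ne_true this
      · rcases pvCandidates s xs i j hilen hsafe h with rfl | rfl
        · exact Or.inl hsafe
        · exact Or.inr hsafe

-- A's flag loop equals the pair of direction checks
theorem pvValidLoop_eq : ∀ (t : List Int) (p : Int) (a d : Bool),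
    pvValidLoop p t a d = ((a && pvSafe 1 (p :: t)) || (d && pvSafe (-1) (p :: t)))
  | [], p, a, d => by simp [pvValidLoop, pvSafe]
  | x :: t, p, a, d => by
    rw [show pvValidLoop p (x :: t) a d
          = (if ¬ (1 ≤ (x - p).natAbs ∧ (x - p).natAbs ≤ 3) then false
             else pvValidLoop x t (if x < p then false else a) (if p < x then false else d)) from rfl]
    by_cases hd : 1 ≤ (x - p).natAbs ∧ (x - p).natAbs ≤ 3
    · rw [if_neg (not_not_intro hd)]
      have ha : (if x < p then false else a) = (a && pvOk 1 p x) := by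
        by_cases hx : x < p
        · have h0 : pvOk 1 p x = false := by simp only [pvOk, decide_eq_false_iff_not]; omega
          simp [hx, h0]
        · have h0 : pvOk 1 p x = true := by simp only [pvOk, decide_eq_true_eq]; omega
          simp [hx, h0]
      have hb : (if p < x then false else d) = (d && pvOk (-1) p x) := by
        by_cases hx : p < x
        · have h0 : pvOk (-1) p x = false := by simp only [pvOk, decide_eq_false_iff_not]; omega
          simp [hx, h0]
        · have h0 : pvOk (-1) p x = true := by simp only [pvOk, decide_eq_true_eq]; omega
          simp [hx, h0]
      rw [pvValidLoop_eq t x _ _, ha, hb,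
          show pvSafe 1 (p :: x :: t) = (pvOk 1 p x && pvSafe 1 (x :: t)) from rfl,
          show pvSafe (-1) (p :: x :: t) = (pvOk (-1) p x && pvSafe (-1) (x :: t)) from rfl]
      simp [Bool.and_assoc]
    · rw [if_pos hd]
      have h1 : pvOk 1 p x = false := by simp [pvOk]; omega
      have h2 : pvOk (-1) p x = false := by simp [pvOk]; omega
      rw [show pvSafe 1 (p :: x :: t) = (pvOk 1 p x && pvSafe 1 (x :: t)) from rfl,
          show pvSafe (-1) (p :: x :: t) = (pvOk (-1) p x && pvSafe (-1) (x :: t)) from rfl,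
          h1, h2]
      simp

theorem pvIsValid_eq (xs : List Int) :
    is_sorted_and_differences_valid xs = (pvSafe 1 xs || pvSafe (-1) xs) := by
  cases xs with
  | nil => rfl
  | cons h t =>
    rw [show is_sorted_and_differences_valid (h :: t) = pvValidLoop h t true true from rfl,
        pvValidLoop_eq]
    simp

-- ===== VERDICT (by name: the statement is the Claim_ definition above) =====
theorem check_with_one_removal_spec : Claim_equal_check_with_one_removal := by
  intro lst _
  unfold Spec_check_with_one_removal
  rw [Bool.eq_iff_iff]
  unfold check_with_one_removal check_with_one_removal_alt
  rw [Bool.or_eq_true, pvCheckDir_iff, pvCheckDir_iff]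
  by_cases hv : is_sorted_and_differences_valid lst = true
  · rw [if_pos hv]
    rw [pvIsValid_eq, Bool.or_eq_true] at hv
    constructor
    · intro _
      rcases hv with h | h
      · exact Or.inl (Or.inl h)
      · exact Or.inr (Or.inl h)
    · intro _; rfl
  · rw [if_neg hv]
    have hvv : pvSafe 1 lst = false ∧ pvSafe (-1) lst = false := by
      rw [pvIsValid_eq] at hv
      constructor <;> [skip; skip] <;>
        (cases h1 : pvSafe 1 lst <;> cases h2 : pvSafe (-1) lst <;>
          simp [h1, h2] at hv ⊢)
    rw [List.any_eq_true]
    simp only [List.mem_range]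
    constructor
    · rintro ⟨i, hi, hval⟩
      rw [show lst.take i ++ lst.drop (i+1) = pvRemoveAt lst i from rfl,
          pvIsValid_eq, Bool.or_eq_true] at hval
      rcases hval with h | h
      · exact Or.inl (Or.inr ⟨i, hi, h⟩)
      · exact Or.inr (Or.inr ⟨i, hi, h⟩)
    · rintro ((h | ⟨i, hi, h⟩) | (h | ⟨i, hi, h⟩))
      · rw [hvv.1] at h; cases h
      · exact ⟨i, hi, by
          rw [show lst.take i ++ lst.drop (i+1) = pvRemoveAt lst i from rfl, pvIsValid_eq, h]
          rfl⟩
      · rw [hvv.2] at h; cases h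
      · exact ⟨i, hi, by
          rw [show lst.take i ++ lst.drop (i+1) = pvRemoveAt lst i from rfl, pvIsValid_eq, h]
          simp⟩
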